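-- pv_equiv track=rewrite | github.com/darsovit/AdventOfCode2020 | Day06/Day06.py | buildGroupAnswer
-- ===== SOURCE A (Python) =====
-- def buildGroupAnswer( input ):
--     groupAnswer = set()
--     for line in input:
--         if len(line) == 0:
--             yield groupAnswer
--             groupAnswer = set()
--         for letter in line:
--             groupAnswer.add( letter )
--     yield groupAnswer
-- ===== SOURCE B (Python) =====
-- def buildGroupAnswer( input ):
--     # Two-pass decomposition: first split the lines into segments (groups),
--     # then yield the answer-set of each segment.
--     groups = [[]]
--     for line in input:
--         if line == "":
--             groups.append([])
--         else:
--             groups[-1].append(line)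
--     for seg in groups:
--         yield set("".join(seg))
-- ===== Notes on version B (the rewrite author's own statement) =====
-- stated objective: alternative
-- what changed: Replaces the single interleaved yield-and-accumulate loop by a two-pass decomposition: first split the lines into group segments (seeded with one empty segment), then map each segment to the set of letters of its joined lines.
import Mathlib
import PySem

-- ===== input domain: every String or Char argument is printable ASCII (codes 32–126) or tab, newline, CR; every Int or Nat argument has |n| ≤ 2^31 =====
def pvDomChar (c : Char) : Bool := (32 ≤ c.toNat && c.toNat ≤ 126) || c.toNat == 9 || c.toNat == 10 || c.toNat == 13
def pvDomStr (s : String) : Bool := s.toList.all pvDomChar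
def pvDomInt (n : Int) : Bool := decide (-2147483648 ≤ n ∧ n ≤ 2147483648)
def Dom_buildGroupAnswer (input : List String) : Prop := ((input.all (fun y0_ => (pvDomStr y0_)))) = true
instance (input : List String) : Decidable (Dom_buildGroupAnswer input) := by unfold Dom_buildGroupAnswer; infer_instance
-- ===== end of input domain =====

-- B replaces A's interleaved yield-and-accumulate loop by a two-pass decomposition
-- (split lines into group segments, then map each segment to its letter set); same cost.


-- ===== PORT A =====
-- one loop over the lines; on an empty line emit the accumulated set and reset it;
-- every letter of the line is added to the running set; a final emit at the end.
def pvAStep (st : List (List String) × PySem.Set String) (line : String) :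
    List (List String) × PySem.Set String :=
  let st := if PySem.Str.len line == 0 then (st.1 ++ [st.2], PySem.Set.empty) else st
  (st.1, line.toList.foldl (fun s c => PySem.Set.add s (String.mk [c])) st.2)

def buildGroupAnswer (input : List String) : List (List String) :=
  let st := input.foldl pvAStep ([], PySem.Set.empty)
  st.1 ++ [st.2]

-- ===== PORT B =====
-- first pass: split the lines into segments (groups), seeded with one empty segment
def pvBStep (gs : List (List String)) (line : String) : List (List String) :=
  if line == "" then gs ++ [[]] else gs.dropLast ++ [gs.getLastD [] ++ [line]]

-- second pass: set("".join(seg)) for each segment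
def buildGroupAnswer_alt (input : List String) : List (List String) :=
  (input.foldl pvBStep [[]]).map
    (fun seg => PySem.Set.ofList ((PySem.Str.join "" seg).toList.map (fun c => String.mk [c])))

-- ===== PRECONDITION & SPEC =====
def Spec_buildGroupAnswer (input : List String) (out : List (List String)) : Prop := out = buildGroupAnswer_alt input
instance (input : List String) (out : List (List String)) : Decidable (Spec_buildGroupAnswer input out) := by unfold Spec_buildGroupAnswer; infer_instance

-- ===== CLAIM (what is proved, stated in full; the proofs are below) =====
def Claim_equal_buildGroupAnswer : Prop := ∀ (input : List String), Dom_buildGroupAnswer input → Spec_buildGroupAnswer input (buildGroupAnswer input)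

-- ===== LEMMAS AND PROOFS =====

-- recursive characterisation of B's first pass: the segments of `ls` with the current
-- (still-open) segment `cur`
def pvSegRec (ls : List String) (cur : List String) : List (List String) :=
  match ls with
  | [] => [cur]
  | l :: ls => if l = "" then cur :: pvSegRec ls [] else pvSegRec ls (cur ++ [l])

-- the letter set of a segment, as both ports produce it
def pvSetOf (seg : List String) : PySem.Set String :=
  PySem.Set.ofList ((seg.flatMap String.toList).map (fun c => String.mk [c]))

lemma pvJoin_eq (seg : List String) :
    (PySem.Str.join "" seg).toList = seg.flatMap String.toList := by
  have h : ∀ l : List (List Char), (List.intersperse ([] : List Char) l).flatten = l.flatten := by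
    intro l
    induction l with
    | nil => simp
    | cons x t ih => cases t <;> simp_all [List.intersperse]
  simp [PySem.Str.toList_join, PySem.Chars.join, List.intercalate, h, List.flatMap]

lemma pvB_fold (ls : List String) (done : List (List String)) (cur : List String) :
    ls.foldl pvBStep (done ++ [cur]) = done ++ pvSegRec ls cur := by
  induction ls generalizing done cur with
  | nil => simp [pvSegRec]
  | cons l ls ih =>
    by_cases h : l = ""
    · subst h
      have hs : pvBStep (done ++ [cur]) "" = (done ++ [cur]) ++ [[]] := by
        simp [pvBStep]
      rw [List.foldl_cons, hs, ih, pvSegRec]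
      simp
    · have hs : pvBStep (done ++ [cur]) l = done ++ [cur ++ [l]] := by
        simp [pvBStep, h]
      rw [List.foldl_cons, hs, ih, pvSegRec]
      simp [h]

lemma pvA_fold (ls : List String) (acc : List (List String)) (pref : List String) :
    (ls.foldl pvAStep (acc, pvSetOf pref)).1 ++ [(ls.foldl pvAStep (acc, pvSetOf pref)).2]
      = acc ++ (pvSegRec ls pref).map pvSetOf := by
  induction ls generalizing acc pref with
  | nil => simp [pvSegRec]
  | cons l ls ih =>
    by_cases h : l = ""
    · subst h
      have hs : pvAStep (acc, pvSetOf pref) "" = (acc ++ [pvSetOf pref], pvSetOf []) := by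
        simp [pvAStep, PySem.Str.len_eq, pvSetOf, PySem.Set.empty, String.toList]
      rw [List.foldl_cons, hs, ih, pvSegRec]
      simp
    · have hne : (PySem.Str.len l == 0) = false := by
        simp [PySem.Str.len_eq]
        exact h
      have hs : pvAStep (acc, pvSetOf pref) l = (acc, pvSetOf (pref ++ [l])) := by
        simp only [pvAStep, hne, Bool.false_eq_true, if_false]
        congr 1
        rw [← PySem.Set.update_map_eq_foldl_add]
        simp [pvSetOf, ← PySem.Set.ofList_append, List.flatMap_append]
      rw [List.foldl_cons, hs, ih, pvSegRec]
      simp [h]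

-- ===== VERDICT (by name: the statement is the Claim_ definition above) =====
theorem buildGroupAnswer_spec : Claim_equal_buildGroupAnswer := by
  intro input _
  show buildGroupAnswer input = buildGroupAnswer_alt input
  have hB : input.foldl pvBStep [[]] = pvSegRec input [] := by
    simpa using pvB_fold input [] []
  have hfun : (fun seg => PySem.Set.ofList
      (((PySem.Str.join "" seg).toList).map (fun c => String.mk [c]))) = pvSetOf := by
    funext seg
    rw [pvJoin_eq]
    rfl
  have hA : (input.foldl pvAStep ([], (PySem.Set.empty : PySem.Set String))).1
        ++ [(input.foldl pvAStep ([], (PySem.Set.empty : PySem.Set String))).2]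
      = (pvSegRec input []).map pvSetOf := by
    simpa using pvA_fold input [] []
  simp only [buildGroupAnswer, buildGroupAnswer_alt, hB, hfun]
  exact hA
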